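-- pv_equiv track=rewrite | github.com/sunmingtao/sample-code | python/projecteuler/p106.py | contains_equal_sum
-- ===== SOURCE A (Python) =====
-- import itertools
--
-- def has_same_total(set1, set2):
--     return sum(set1) == sum(set2)
--
-- def contains_equal_sum(candidate_set):
--     candidate_set = list(candidate_set)
--     candidate_set.sort()
--     for i in range(2, len(candidate_set) // 2 + 1):
--         sub_sets = list(itertools.combinations(candidate_set, i))
--         for _subset in sub_sets:
--             remaining_set = set(candidate_set) - set(_subset)
--             remaining_subsets = list(itertools.combinations(remaining_set, i))
--             for _remaining_subset in remaining_subsets: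
--                 if has_same_total(_subset, _remaining_subset):
--                     return True
--     return False
-- ===== SOURCE B (Python) =====
-- import itertools
--
-- def contains_equal_sum(candidate_set):
--     lst = list(candidate_set)
--     n = len(lst)
--     vals = sorted(set(lst))
--     for i in range(2, n // 2 + 1):
--         for t in itertools.combinations(vals, i):
--             target = sum(t)
--             banned = set(t)
--             rest = [x for x in lst if x not in banned]
--             sums = [{0}] + [set() for _ in range(i)]
--             for x in rest:
--                 sums = [sums[0]] + [sums[j + 1] | {v + x for v in sums[j]} for j in range(i)]
--             if target in sums[i]:
--                 return True
--     return False
-- ===== Notes on version B (the rewrite author's own statement) =====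
-- stated objective: faster
-- what changed: B inverts the enumeration: instead of enumerating i-combinations of the list and, for each, i-combinations of the remaining value set (A), B enumerates i-subsets of the distinct values once and decides the complementary side with an exact-count subset-sum DP over the filtered list, so its work scales with the number of distinct values times a DP polynomial in n rather than with pairs of combinations of the full list.
import Mathlib
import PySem

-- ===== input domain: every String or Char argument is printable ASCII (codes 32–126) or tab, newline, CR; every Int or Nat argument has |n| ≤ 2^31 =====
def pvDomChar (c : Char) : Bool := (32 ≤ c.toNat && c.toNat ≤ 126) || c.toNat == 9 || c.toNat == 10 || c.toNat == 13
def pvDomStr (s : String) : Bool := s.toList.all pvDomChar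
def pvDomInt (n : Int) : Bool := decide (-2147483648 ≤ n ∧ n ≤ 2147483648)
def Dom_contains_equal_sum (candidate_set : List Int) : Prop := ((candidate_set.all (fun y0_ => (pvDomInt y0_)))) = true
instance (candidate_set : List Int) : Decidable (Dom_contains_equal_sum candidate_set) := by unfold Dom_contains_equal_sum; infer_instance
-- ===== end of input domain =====

-- B replaces A's pairwise enumeration (i-combinations of the list × i-combinations of the
-- remaining value set) by enumerating i-subsets of the distinct values once and deciding the
-- other side with an exact-count subset-sum DP; measured faster in a timing run.

-- ===== PORT A =====
def has_same_total (set1 set2 : List Int) : Bool := set1.sum == set2.sum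

-- `itertools.combinations(remaining_set, i)` iterates a Python set in hash order; only the
-- EXISTENCE of an equal-sum combination reaches the result, so the port may use the Set's
-- list order (the returned Bool is identical).
def contains_equal_sum (candidate_set : List Int) : Bool :=
  let cs := PySem.List.sorted candidate_set (fun x => x) false
  (PySem.List.pyRange 2 (PySem.Int.floordiv (Int.ofNat cs.length) 2 + 1) 1).any (fun i =>
    (PySem.List.combinations cs i.toNat).any (fun subset =>
      let remaining := PySem.Set.diff (PySem.Set.ofList cs) (PySem.Set.ofList subset)
      (PySem.List.combinations remaining i.toNat).any (fun rsub =>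
        has_same_total subset rsub)))

-- ===== PORT B =====
-- one DP step: new[0] = old[0]; new[j+1] = old[j+1] ∪ {v + x | v ∈ old[j]}  (j < k)
def pvReachStep (k : Nat) (x : Int) (sums : List (PySem.Set Int)) : List (PySem.Set Int) :=
  sums.getD 0 PySem.Set.empty ::
    (List.range k).map (fun j =>
      PySem.Set.union (sums.getD (j+1) PySem.Set.empty)
        ((sums.getD j PySem.Set.empty).map (fun v => v + x)))

def contains_equal_sum_alt (candidate_set : List Int) : Bool :=
  let n := candidate_set.length
  let vals := PySem.List.sorted (PySem.Set.ofList candidate_set) (fun x => x) false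
  (PySem.List.pyRange 2 (PySem.Int.floordiv (Int.ofNat n) 2 + 1) 1).any (fun i =>
    (PySem.List.combinations vals i.toNat).any (fun t =>
      let target := t.sum
      let banned := PySem.Set.ofList t
      let rest := candidate_set.filter (fun x => !(PySem.Set.contains banned x))
      let final := rest.foldl (fun sums x => pvReachStep i.toNat x sums)
        (PySem.Set.ofList [0] :: List.replicate i.toNat PySem.Set.empty)
      PySem.Set.contains (final.getD i.toNat PySem.Set.empty) target))

-- ===== PRECONDITION & SPEC =====
def Spec_contains_equal_sum (candidate_set : List Int) (out : Bool) : Prop := out = contains_equal_sum_alt candidate_set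
instance (candidate_set : List Int) (out : Bool) : Decidable (Spec_contains_equal_sum candidate_set out) := by unfold Spec_contains_equal_sum; infer_instance

-- ===== CLAIM (what is proved, stated in full; the proofs are below) =====
def Claim_equal_contains_equal_sum : Prop := ∀ (candidate_set : List Int), Dom_contains_equal_sum candidate_set → Spec_contains_equal_sum candidate_set (contains_equal_sum candidate_set)

-- ===== LEMMAS AND PROOFS =====

-- set(xs) (first occurrences in order) is a sublist of xs
lemma foldl_add_sublist (xs : List Int) : ∀ acc : PySem.Set Int,
    (xs.foldl PySem.Set.add acc).Sublist (acc ++ xs) := by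
  induction xs with
  | nil => intro acc; simp
  | cons x xs ih =>
    intro acc
    simp only [List.foldl_cons]
    by_cases h : x ∈ acc
    · have h1 := ih acc
      have he : PySem.Set.add acc x = acc := by simp [PySem.Set.add, h]
      rw [he]
      exact h1.trans (List.Sublist.append_left (List.sublist_cons_self x xs) acc)
    · have h1 := ih (acc ++ [x])
      have he : PySem.Set.add acc x = acc ++ [x] := by simp [PySem.Set.add, h]
      rw [he]
      simpa using h1

lemma ofList_sublist (xs : List Int) : (PySem.Set.ofList xs).Sublist xs := by
  have := foldl_add_sublist xs []
  simpa [PySem.Set.ofList_eq_foldl] using this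

-- set(sorted(xs)) as a list equals sorted(set(xs))
lemma ofList_sorted_eq (cs : List Int) :
    PySem.Set.ofList (PySem.List.sorted cs (fun x => x) false)
      = PySem.List.sorted (PySem.Set.ofList cs) (fun x => x) false := by
  have hsub := ofList_sublist (PySem.List.sorted cs (fun x => x) false)
  have hle : (PySem.List.sorted cs (fun x => x) false).Pairwise (fun a b => a ≤ b) :=
    PySem.List.sorted_pairwise cs (fun x => x)
  have hle' := hle.sublist hsub
  have hnd : (PySem.Set.ofList (PySem.List.sorted cs (fun x => x) false)).Nodup :=
    PySem.Set.nodup_ofList _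
  have hlt : (PySem.Set.ofList (PySem.List.sorted cs (fun x => x) false)).Pairwise (· < ·) := by
    refine (List.pairwise_and_iff.mpr ⟨hle', hnd⟩).imp ?_
    intro a b h; exact lt_of_le_of_ne h.1 h.2
  have hperm : (PySem.Set.ofList (PySem.List.sorted cs (fun x => x) false)).Perm
      (PySem.Set.ofList cs) := by
    refine (List.perm_ext_iff_of_nodup hnd (PySem.Set.nodup_ofList _)).mpr ?_
    intro a
    simp [PySem.Set.mem_ofList, PySem.List.mem_sorted]
  exact (PySem.List.sorted_eq_of_perm_of_pairwise_lt _ _ (fun x => x) hperm hlt).symm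

lemma sublist_filter_iff (T l : List Int) (p : Int → Bool) :
    T.Sublist (l.filter p) ↔ T.Sublist l ∧ ∀ x ∈ T, p x = true := by
  constructor
  · intro h
    exact ⟨h.trans List.filter_sublist, fun x hx => List.of_mem_filter (h.subset hx)⟩
  · rintro ⟨h, hall⟩
    have heq : T.filter p = T := List.filter_eq_self.mpr hall
    have h2 := List.Sublist.filter p h
    rwa [heq] at h2

lemma length_pvReachStep (k : Nat) (x : Int) (sums : List (PySem.Set Int)) :
    (pvReachStep k x sums).length = k + 1 := by
  simp [pvReachStep]

lemma mem_pvReachStep (k : Nat) (x : Int) (sums : List (PySem.Set Int))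
    (hlen : sums.length = k + 1) (j : Nat) (v : Int) :
    v ∈ (pvReachStep k x sums).getD j PySem.Set.empty ↔
      (v ∈ sums.getD j PySem.Set.empty) ∨
        (1 ≤ j ∧ j ≤ k ∧ (v - x) ∈ sums.getD (j - 1) PySem.Set.empty) := by
  rcases j with _ | j
  · simp [pvReachStep]
  · have hL : (pvReachStep k x sums).getD (j + 1) PySem.Set.empty
        = ((List.range k).map (fun j =>
            PySem.Set.union (sums.getD (j+1) PySem.Set.empty)
              ((sums.getD j PySem.Set.empty).map (fun v => v + x)))).getD j PySem.Set.empty := by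
      simp [pvReachStep, List.getD]
    rw [hL]
    by_cases hk : j < k
    · have hj : ((List.range k).map (fun j =>
            PySem.Set.union (sums.getD (j+1) PySem.Set.empty)
              ((sums.getD j PySem.Set.empty).map (fun v => v + x)))).getD j PySem.Set.empty
          = PySem.Set.union (sums.getD (j+1) PySem.Set.empty)
              ((sums.getD j PySem.Set.empty).map (fun v => v + x)) := by
        simp [List.getD, hk]
      rw [hj, PySem.Set.mem_union]
      constructor
      · rintro (h | h)
        · exact Or.inl h
        · rcases List.mem_map.mp h with ⟨w, hw, he⟩
          refine Or.inr ⟨by omega, by omega, ?_⟩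
          have : v - x = w := by omega
          simpa [this] using hw
      · rintro (h | ⟨-, -, h⟩)
        · exact Or.inl h
        · refine Or.inr (List.mem_map.mpr ⟨v - x, by simpa using h, by ring⟩)
    · have h1 : ((List.range k).map (fun j =>
            PySem.Set.union (sums.getD (j+1) PySem.Set.empty)
              ((sums.getD j PySem.Set.empty).map (fun v => v + x)))).getD j PySem.Set.empty
          = PySem.Set.empty := by
        apply List.getD_eq_default
        simpa using hk
      have h2 : sums.getD (j + 1) PySem.Set.empty = PySem.Set.empty := by
        apply List.getD_eq_default
        omega
      rw [h1, h2]
      simp [PySem.Set.empty]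
      omega

lemma reach_foldl_mem (k : Nat) (xs : List Int) : ∀ (sums : List (PySem.Set Int)),
    sums.length = k + 1 → ∀ (j : Nat), j ≤ k → ∀ (v : Int),
    (v ∈ (xs.foldl (fun s x => pvReachStep k x s) sums).getD j PySem.Set.empty ↔
      ∃ (S : List Int) (j' : Nat), S.Sublist xs ∧ j' + S.length = j ∧
        (v - S.sum) ∈ sums.getD j' PySem.Set.empty) := by
  induction xs with
  | nil =>
    intro sums hlen j hj v
    simp only [List.foldl_nil]
    constructor
    · intro h
      exact ⟨[], j, List.nil_sublist _, by simp, by simpa using h⟩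
    · rintro ⟨S, j', hS, hj', hmem⟩
      have hS0 : S = [] := List.sublist_nil.mp hS
      subst hS0
      simp only [List.length_nil, Nat.add_zero] at hj'
      subst hj'
      simpa using hmem
  | cons x xs ih =>
    intro sums hlen j hj v
    simp only [List.foldl_cons]
    rw [ih (pvReachStep k x sums) (length_pvReachStep k x sums) j hj v]
    constructor
    · rintro ⟨S, j', hS, hlen', hmem⟩
      rw [mem_pvReachStep k x sums hlen j'] at hmem
      rcases hmem with h1 | ⟨hb1, hb2, h3⟩
      · exact ⟨S, j', hS.cons x, hlen', h1⟩
      · refine ⟨x :: S, j' - 1, List.cons_sublist_cons.mpr hS, by simp; omega, ?_⟩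
        have he : v - (x :: S).sum = v - S.sum - x := by simp [List.sum_cons]; ring
        rw [he]
        exact h3
    · rintro ⟨S, j', hS, hlen', hmem⟩
      rcases List.sublist_cons_iff.mp hS with h | ⟨r, rfl, hr⟩
      · exact ⟨S, j', h, hlen', (mem_pvReachStep k x sums hlen j' _).mpr (Or.inl hmem)⟩
      · refine ⟨r, j' + 1, hr, by simp at hlen' ⊢; omega, ?_⟩
        rw [mem_pvReachStep k x sums hlen (j' + 1)]
        refine Or.inr ⟨by omega, by simp at hlen'; omega, ?_⟩
        have he : v - r.sum - x = v - (x :: r).sum := by simp [List.sum_cons]; ring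
        simpa [he] using hmem

lemma reach_spec (k : Nat) (xs : List Int) (v : Int) :
    PySem.Set.contains
        ((xs.foldl (fun s x => pvReachStep k x s)
            (PySem.Set.ofList [0] :: List.replicate k PySem.Set.empty)).getD k PySem.Set.empty)
        v = true
      ↔ ∃ S : List Int, S.Sublist xs ∧ S.length = k ∧ S.sum = v := by
  have hinit : (PySem.Set.ofList [(0 : Int)] :: List.replicate k (PySem.Set.empty : PySem.Set Int)).length = k + 1 := by
    simp
  rw [show (PySem.Set.contains
        ((xs.foldl (fun s x => pvReachStep k x s)
            (PySem.Set.ofList [0] :: List.replicate k PySem.Set.empty)).getD k PySem.Set.empty) v = true)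
      ↔ v ∈ ((xs.foldl (fun s x => pvReachStep k x s)
            (PySem.Set.ofList [0] :: List.replicate k PySem.Set.empty)).getD k PySem.Set.empty) from by
    simp [PySem.Set.contains, List.contains_eq_mem]]
  rw [reach_foldl_mem k xs _ hinit k le_rfl v]
  constructor
  · rintro ⟨S, j', hS, hlen', hmem⟩
    rcases j' with _ | j'
    · simp only [List.getD_cons_zero] at hmem
      have h0 : v - S.sum = 0 := by simpa [PySem.Set.ofList] using hmem
      exact ⟨S, hS, by omega, by omega⟩
    · exfalso
      have : (List.replicate k (PySem.Set.empty : PySem.Set Int)).getD j' PySem.Set.empty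
          = PySem.Set.empty := by
        rcases Nat.lt_or_ge j' k with h | h
        · simp [List.getD, h]
        · exact List.getD_eq_default _ _ (by simpa using h)
      rw [List.getD_cons_succ, this] at hmem
      simp [PySem.Set.empty] at hmem
  · rintro ⟨S, hS, hlen', hsum⟩
    refine ⟨S, 0, hS, by omega, ?_⟩
    simp [PySem.Set.ofList, hsum]

-- the loop inversion: A's (subset, remaining-subset) pairs ↔ B's (value subset, DP) pairs
lemma key_iff (cs : List Int) (k : Nat) :
    (∃ S : List Int, (S.Sublist (PySem.List.sorted cs (fun x => x) false) ∧ S.length = k) ∧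
      ∃ T : List Int, (T.Sublist (PySem.Set.ofList (PySem.List.sorted cs (fun x => x) false)) ∧
            T.length = k ∧ ∀ x ∈ T, x ∉ S) ∧ S.sum = T.sum)
    ↔ (∃ T : List Int, (T.Sublist (PySem.Set.ofList (PySem.List.sorted cs (fun x => x) false)) ∧
            T.length = k) ∧
        ∃ S : List Int, S.Sublist (cs.filter (fun x => !(T.contains x))) ∧ S.length = k ∧ S.sum = T.sum) := by
  have hperm : (PySem.List.sorted cs (fun x => x) false).Perm cs := PySem.List.sorted_perm cs (fun x => x) false
  constructor
  · rintro ⟨S, ⟨hSsub, hSlen⟩, T, ⟨hTsub, hTlen, hdisj⟩, hsum⟩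
    have hSP : S.Subperm cs := (hSsub.subperm).trans hperm.subperm
    have hfil : S.filter (fun x => !(T.contains x)) = S := by
      apply List.filter_eq_self.mpr
      intro x hx
      simp only [Bool.not_eq_eq_eq_not, Bool.not_true, List.contains_eq_mem, decide_eq_false_iff_not]
      intro hxT
      exact hdisj x hxT hx
    have hSP2 := hSP.filter (fun x => !(T.contains x))
    rw [hfil] at hSP2
    obtain ⟨S', hS'p, hS'sub⟩ := hSP2
    refine ⟨T, ⟨hTsub, hTlen⟩, S', hS'sub, by rw [hS'p.length_eq, hSlen], ?_⟩
    rw [hS'p.sum_eq]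
    omega
  · rintro ⟨T, ⟨hTsub, hTlen⟩, S, hSsub, hSlen, hsum⟩
    have hSP : S.Subperm (PySem.List.sorted cs (fun x => x) false) :=
      ((hSsub.trans List.filter_sublist).subperm).trans hperm.symm.subperm
    obtain ⟨S', hS'p, hS'sub⟩ := hSP
    refine ⟨S', ⟨hS'sub, by rw [hS'p.length_eq, hSlen]⟩, T, ⟨hTsub, hTlen, ?_⟩, ?_⟩
    · intro x hxT hxS'
      have hxS : x ∈ S := hS'p.subset hxS'
      have := List.of_mem_filter (hSsub.subset hxS)
      simp only [Bool.not_eq_eq_eq_not, Bool.not_true, List.contains_eq_mem, decide_eq_false_iff_not] at this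
      exact this hxT
    · rw [hS'p.sum_eq]
      omega

-- ===== VERDICT (by name: the statement is the Claim_ definition above) =====
lemma contains_ofList (l : List Int) (x : Int) :
    PySem.Set.contains (PySem.Set.ofList l) x = l.contains x := by
  simp [PySem.Set.contains, List.contains_eq_mem, PySem.Set.mem_ofList]

lemma sublist_diff_iff (T l S : List Int) :
    T.Sublist ((PySem.Set.ofList l).diff (PySem.Set.ofList S)) ↔
      T.Sublist (PySem.Set.ofList l) ∧ ∀ x ∈ T, x ∉ S := by
  have hd : (PySem.Set.ofList l).diff (PySem.Set.ofList S)
      = (PySem.Set.ofList l).filter (fun x => !((PySem.Set.ofList S).contains x)) := by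
    simp [PySem.Set.diff]
  rw [hd, sublist_filter_iff]
  simp [List.contains_eq_mem, PySem.Set.mem_ofList]

theorem contains_equal_sum_spec : Claim_equal_contains_equal_sum := by
  intro cs _
  unfold Spec_contains_equal_sum contains_equal_sum contains_equal_sum_alt
  simp only [PySem.List.length_sorted]
  refine PySem.List.any_congr_mem ?_
  intro i _
  rw [Bool.eq_iff_iff]
  simp only [List.any_eq_true, PySem.List.mem_combinations_iff, has_same_total, beq_iff_eq,
    ← ofList_sorted_eq, contains_ofList, reach_spec]
  have h := key_iff cs i.toNat
  constructor
  · rintro ⟨S, hS, T, ⟨hT1, hT2⟩, hsum⟩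
    rw [sublist_diff_iff] at hT1
    exact h.mp ⟨S, hS, T, ⟨hT1.1, hT2, hT1.2⟩, hsum⟩
  · intro hb
    obtain ⟨S, hS, T, ⟨hT1, hT2, hT3⟩, hsum⟩ := h.mpr hb
    exact ⟨S, hS, T, ⟨(sublist_diff_iff _ _ _).mpr ⟨hT1, hT3⟩, hT2⟩, hsum⟩
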